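-- pv_equiv track=rewrite | github.com/PimdejVani/dsi-208-bubble-merge-algorithm | merge sort.py | latest_not_zero
-- ===== SOURCE A (Python) =====
-- def latest_not_zero (arr = None) :
--     if 0 in arr :
--         for i in range(len(arr)) :
--             if arr[i] != 0 :
--                 return i
--         return 0
--     else :
--         return 0
-- ===== SOURCE B (Python) =====
-- def latest_not_zero(arr=None):
--     has_zero = False
--     first_nonzero = None
--     for i, x in enumerate(arr):
--         if x == 0:
--             has_zero = True
--         elif first_nonzero is None:
--             first_nonzero = i
--     return first_nonzero if has_zero and first_nonzero is not None else 0
-- ===== Notes on version B (the rewrite author's own statement) =====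
-- stated objective: simpler
-- what changed: Replaces A's two scans (a '0 in arr' membership pass followed by an indexed first-nonzero pass) by one enumerate pass maintaining a has_zero flag and the first nonzero index.
import Mathlib
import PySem

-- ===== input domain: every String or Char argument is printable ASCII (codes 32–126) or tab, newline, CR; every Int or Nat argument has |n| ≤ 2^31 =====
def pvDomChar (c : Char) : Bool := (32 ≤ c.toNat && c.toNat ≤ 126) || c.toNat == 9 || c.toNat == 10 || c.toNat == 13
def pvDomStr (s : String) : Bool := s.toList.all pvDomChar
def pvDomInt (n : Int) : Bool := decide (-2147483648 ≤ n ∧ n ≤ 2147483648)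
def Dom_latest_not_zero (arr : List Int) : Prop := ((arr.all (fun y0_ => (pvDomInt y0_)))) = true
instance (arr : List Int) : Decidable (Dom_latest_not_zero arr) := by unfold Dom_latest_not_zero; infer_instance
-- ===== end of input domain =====

-- B fuses A's two scans (membership test, then indexed first-nonzero loop) into one
-- enumerate pass with a has_zero flag and a first-nonzero option; return value only.

-- ===== PORT A =====
-- A's 'for i in range(len(arr)): if arr[i] != 0: return i' with trailing 'return 0'
def latest_not_zero_loop (arr : List Int) : List Int → Int
  | [] => 0
  | i :: rest => if PySem.List.pyGetD arr i 0 ≠ 0 then i else latest_not_zero_loop arr rest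

def latest_not_zero (arr : List Int) : Int :=
  if (0 : Int) ∈ arr then
    latest_not_zero_loop arr (PySem.List.pyRange 0 arr.length 1)
  else 0

-- ===== PORT B =====
-- loop body: x == 0 sets has_zero; elif first_nonzero is None records i
def latest_not_zero_alt_step (st : Bool × Option Int) (p : Int × Int) : Bool × Option Int :=
  if p.2 = 0 then (true, st.2)
  else if st.2 = none then (st.1, some p.1)
  else st

def latest_not_zero_alt (arr : List Int) : Int :=
  match (PySem.List.enumerate arr 0).foldl latest_not_zero_alt_step (false, none) with
  | (true, some i) => i
  | _ => 0

-- ===== PRECONDITION & SPEC =====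
def Spec_latest_not_zero (arr : List Int) (out : Int) : Prop := out = latest_not_zero_alt arr
instance (arr : List Int) (out : Int) : Decidable (Spec_latest_not_zero arr out) := by unfold Spec_latest_not_zero; infer_instance

-- ===== CLAIM (what is proved, stated in full; the proofs are below) =====
def Claim_equal_latest_not_zero : Prop := ∀ (arr : List Int), Dom_latest_not_zero arr → Spec_latest_not_zero arr (latest_not_zero arr)

-- ===== LEMMAS AND PROOFS =====

-- A's loop over range(len(arr)) starting at offset pre.length = first nonzero index of the suffix
theorem latest_not_zero_loop_char (suf : List Int) : ∀ (pre : List Int),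
    latest_not_zero_loop (pre ++ suf) (PySem.List.pyRange pre.length (pre ++ suf).length 1)
      = match suf.findIdx? (· ≠ 0) with
        | some i => (pre.length : Int) + i
        | none => 0 := by
  induction suf with
  | nil =>
      intro pre
      simp [PySem.List.pyRange_one_eq_nil, latest_not_zero_loop]
  | cons x suf ih =>
      intro pre
      have hlt : (pre.length : Int) < ((pre ++ x :: suf).length : Int) := by
        simp
      rw [PySem.List.pyRange_one_cons hlt]
      have hget : PySem.List.pyGetD (pre ++ x :: suf) (pre.length : Int) 0 = x := by
        rw [PySem.List.pyGetD_natCast]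
        simp [List.getD]
      have h1 : ((pre.length : Int) + 1) = ((pre ++ [x]).length : Int) := by simp
      have h2 : pre ++ x :: suf = (pre ++ [x]) ++ suf := by simp
      by_cases hx : x = 0
      · simp only [latest_not_zero_loop]
        rw [hget, if_neg (by simp [hx]), h1, h2, ih (pre ++ [x])]
        simp only [List.findIdx?_cons, hx]
        cases hfi : List.findIdx? (fun x => decide (x ≠ 0)) suf with
        | none => simp
        | some i => simp; ring
      · simp only [latest_not_zero_loop]
        rw [hget, if_pos hx]
        simp [List.findIdx?_cons, hx]

-- B's fold once first_nonzero is set: state frozen except has_zero keeps updating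
theorem alt_fold_some (suf : List Int) : ∀ (s : Int) (hz : Bool) (j : Int),
    (PySem.List.enumerate suf s).foldl latest_not_zero_alt_step (hz, some j)
      = (hz || suf.contains 0, some j) := by
  induction suf with
  | nil => intro s hz j; simp [PySem.List.enumerate_nil]
  | cons x suf ih =>
      intro s hz j
      rw [PySem.List.enumerate_cons]
      by_cases hx : x = 0
      · simp [List.foldl_cons, latest_not_zero_alt_step, hx, ih]
      · have h0x : (0 : Int) ≠ x := fun h => hx h.symm
        simp [List.foldl_cons, latest_not_zero_alt_step, hx, ih, h0x]

-- B's fold from a none state: has_zero accumulates membership, option = first nonzero index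
theorem alt_fold_none (suf : List Int) : ∀ (s : Int) (hz : Bool),
    (PySem.List.enumerate suf s).foldl latest_not_zero_alt_step (hz, none)
      = (hz || suf.contains 0, (suf.findIdx? (· ≠ 0)).map (fun i => s + (i : Int))) := by
  induction suf with
  | nil => intro s hz; simp [PySem.List.enumerate_nil]
  | cons x suf ih =>
      intro s hz
      rw [PySem.List.enumerate_cons]
      by_cases hx : x = 0
      · simp [List.foldl_cons, latest_not_zero_alt_step, hx, ih, List.findIdx?_cons]
        cases hfi : List.findIdx? (fun x => !decide (x = 0)) suf with
        | none => simp
        | some i => simp; ring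
      · simp only [List.foldl_cons, latest_not_zero_alt_step, hx]
        have h0x : (0 : Int) ≠ x := fun h => hx h.symm
        simp [alt_fold_some, List.findIdx?_cons, hx, h0x]

-- ===== VERDICT (by name: the statement is the Claim_ definition above) =====
theorem latest_not_zero_spec : Claim_equal_latest_not_zero := by
  intro arr _
  unfold Spec_latest_not_zero latest_not_zero latest_not_zero_alt
  rw [alt_fold_none arr 0 false]
  have hA := latest_not_zero_loop_char arr []
  simp only [List.nil_append, List.length_nil, Nat.cast_zero] at hA
  by_cases hz : (0 : Int) ∈ arr
  · rw [if_pos hz, hA]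
    cases hfi : List.findIdx? (fun x => decide (x ≠ 0)) arr <;> simp [hz]
  · rw [if_neg hz]
    have hc : decide ((0:Int) ∈ arr) = false := by simpa using hz
    cases hfi : List.findIdx? (fun x => decide (x ≠ 0)) arr <;> simp [hc]
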